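-- pv_equiv track=rewrite | github.com/redmac135/quantum-portfolio-optimization | backend/utils.py | common_keys
-- ===== SOURCE A (Python) =====
-- def common_keys(dicts):
--     if not dicts or not isinstance(dicts, dict):
--         raise ValueError("Input must be a non-empty dictionary")
--     values = list(dicts.values())
--     if not all(isinstance(d, dict) for d in values):
--         raise ValueError("All values must be dictionaries")
--     if len(values) < 2:
--         raise ValueError("Input must contain at least two dictionaries")
--
--     common_keys_set = set(
--         values[0].keys()
--     )  # Initialize with keys of the first dictionary
--     for d in values[1:]:
--         common_keys_set.intersection_update(
--             d.keys()
--         )  # Update with common keys in each dictionary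
--     common_keys_list = list(common_keys_set)
--
--     for key in dicts:
--         dicts[key] = {k: v for k, v in dicts[key].items() if k in common_keys_list}
--
--     return dicts
-- ===== SOURCE B (Python) =====
-- def common_keys(dicts):
--     if not dicts or not isinstance(dicts, dict):
--         raise ValueError("Input must be a non-empty dictionary")
--     values = list(dicts.values())
--     if not all(isinstance(d, dict) for d in values):
--         raise ValueError("All values must be dictionaries")
--     if len(values) < 2:
--         raise ValueError("Input must contain at least two dictionaries")
--
--     cnt = {}
--     for d in values:
--         for k in d:
--             cnt[k] = cnt.get(k, 0) + 1
--     n = len(values)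
--     common = {k for k, c in cnt.items() if c == n}
--
--     for key in dicts:
--         dicts[key] = {k: v for k, v in dicts[key].items() if k in common}
--     return dicts
-- ===== Notes on version B (the rewrite author's own statement) =====
-- stated objective: alternative
-- what changed: Replaces the seed-set-then-shrink intersection_update loop with a single accumulate pass incrementing a counter over every key of every inner dict, taking as common exactly the keys whose count equals the number of inner dicts; validation and the in-place filtering pass are unchanged.
import Mathlib
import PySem

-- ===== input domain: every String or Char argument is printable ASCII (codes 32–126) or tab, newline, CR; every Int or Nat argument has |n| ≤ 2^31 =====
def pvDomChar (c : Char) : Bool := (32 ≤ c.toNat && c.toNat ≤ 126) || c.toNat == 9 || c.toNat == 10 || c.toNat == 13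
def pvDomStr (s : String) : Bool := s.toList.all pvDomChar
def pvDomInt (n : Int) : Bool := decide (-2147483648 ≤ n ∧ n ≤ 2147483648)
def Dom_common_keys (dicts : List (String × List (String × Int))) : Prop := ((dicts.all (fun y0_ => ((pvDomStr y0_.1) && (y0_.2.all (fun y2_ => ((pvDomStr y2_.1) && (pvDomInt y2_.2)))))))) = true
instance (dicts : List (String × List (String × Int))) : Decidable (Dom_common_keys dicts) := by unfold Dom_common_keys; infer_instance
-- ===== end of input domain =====

-- B replaces the shrinking-set intersection loop by one counting pass thresholded at the number
-- of inner dicts; both versions mutate the argument dict in place in Python (the proved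
-- equivalence is about the returned value, which is the same mutated object in both).

-- ===== PORT A =====
-- A: seed a set with the first inner dict's keys, shrink it by intersection with each further
-- inner dict's keys, then filter every inner dict to that set.
def common_keys (dicts : List (String × List (String × Int))) : List (String × List (String × Int)) :=
  match dicts.map (·.2) with
  | [] => []  -- unreachable under Pre_ (Python raises ValueError on an empty dict)
  | v0 :: rest =>
    let commonSet : PySem.Set String :=
      rest.foldl (fun s d => PySem.Set.inter s (d.map (·.1))) (PySem.Set.ofList (v0.map (·.1)))
    dicts.map (fun p => (p.1, p.2.filter (fun kv => commonSet.contains kv.1)))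

-- ===== PORT B =====
-- B: one pass incrementing a counter over every key of every inner dict; common keys are those
-- whose count equals the number of inner dicts.
def common_keys_alt (dicts : List (String × List (String × Int))) : List (String × List (String × Int)) :=
  let values := dicts.map (·.2)
  let cnt : PySem.Dict String Int :=
    values.foldl (fun c d => (d.map (·.1)).foldl (fun c k => c.modify k 0 (· + 1)) c) PySem.Dict.empty
  let n : Int := values.length
  let common : List String := (cnt.items.filter (fun p => p.2 == n)).map (·.1)
  dicts.map (fun p => (p.1, p.2.filter (fun kv => common.contains kv.1)))

-- ===== PRECONDITION & SPEC =====
-- Pre_ excludes dicts with fewer than two entries (Python A raises ValueError there) and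
-- association lists with duplicate outer or inner keys, which do not encode any Python dict input.
def Pre_common_keys (dicts : List (String × List (String × Int))) : Prop :=
  2 ≤ dicts.length ∧ (dicts.map (·.1)).Nodup ∧ ∀ p ∈ dicts, (p.2.map (·.1)).Nodup
instance (dicts : List (String × List (String × Int))) : Decidable (Pre_common_keys dicts) := by
  unfold Pre_common_keys; infer_instance
def pvWitness_common_keys : (List (String × List (String × Int))) :=
  [("a", [("x", 1), ("y", 2)]), ("b", [("x", 3)])]
def Spec_common_keys (dicts : List (String × List (String × Int))) (out : List (String × List (String × Int))) : Prop := out = common_keys_alt dicts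
instance (dicts : List (String × List (String × Int))) (out : List (String × List (String × Int))) : Decidable (Spec_common_keys dicts out) := by unfold Spec_common_keys; infer_instance

-- ===== CLAIM (what is proved, stated in full; the proofs are below) =====
def Claim_equal_common_keys : Prop := ∀ (dicts : List (String × List (String × Int))), Dom_common_keys dicts → Pre_common_keys dicts → Spec_common_keys dicts (common_keys dicts)

-- ===== LEMMAS AND PROOFS =====

-- A's fold of intersections: membership means membership in the seed and in every further key list.
theorem mem_foldl_inter (rest : List (List (String × Int))) (s : PySem.Set String) (x : String) :
    x ∈ rest.foldl (fun s d => PySem.Set.inter s (d.map (·.1))) s ↔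
      x ∈ s ∧ ∀ d ∈ rest, x ∈ d.map (·.1) := by
  induction rest generalizing s with
  | nil => simp
  | cons d rest ih =>
    simp [List.foldl_cons, ih, PySem.Set.mem_inter]
    tauto

-- B's counter: the count of x is the sum over the inner dicts of x's count in that key list.
theorem cnt_getD (vs : List (List (String × Int))) (c : PySem.Dict String Int) (x : String) :
    (vs.foldl (fun c d => (d.map (·.1)).foldl (fun c k => c.modify k 0 (· + 1)) c) c).getD x 0 =
      c.getD x 0 + ((vs.map (fun d => (d.map (·.1)).count x)).sum : Int) := by
  induction vs generalizing c with
  | nil => simp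
  | cons d vs ih =>
    simp only [List.foldl_cons, ih, List.map_cons, List.sum_cons,
      PySem.Dict.getD_foldl_modify_add_one]
    ring

-- With Nodup key lists, each per-dict count is 0 or 1, so the total is at most the number of dicts …
theorem sum_count_le (vs : List (List (String × Int))) (x : String)
    (h : ∀ d ∈ vs, (d.map (·.1)).Nodup) :
    (vs.map (fun d => (d.map (·.1)).count x)).sum ≤ vs.length := by
  induction vs with
  | nil => simp
  | cons d vs ih =>
    have h1 := List.nodup_iff_count_le_one.mp (h d (by simp)) x
    have h2 := ih (fun d' hm => h d' (by simp [hm]))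
    simp only [List.map_cons, List.sum_cons, List.length_cons]
    omega

-- … and it equals that number iff x occurs in every key list.
theorem sum_count_eq_iff (vs : List (List (String × Int))) (x : String)
    (h : ∀ d ∈ vs, (d.map (·.1)).Nodup) :
    (vs.map (fun d => (d.map (·.1)).count x)).sum = vs.length ↔ ∀ d ∈ vs, x ∈ d.map (·.1) := by
  induction vs with
  | nil => simp
  | cons d vs ih =>
    have hd1 := List.nodup_iff_count_le_one.mp (h d (by simp)) x
    have hvs : ∀ d ∈ vs, (d.map (·.1)).Nodup := fun d' hm => h d' (by simp [hm])
    have hle2 := sum_count_le vs x hvs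
    simp only [List.map_cons, List.sum_cons, List.length_cons, List.mem_cons]
    constructor
    · intro heq
      have hdx : (d.map (·.1)).count x = 1 := by omega
      have hrest : (vs.map (fun d => (d.map (·.1)).count x)).sum = vs.length := by omega
      intro d' hd'
      rcases hd' with rfl | hm
      · exact List.count_pos_iff.mp (by omega)
      · exact (ih hvs).mp hrest d' hm
    · intro hall
      have h1 : (d.map (·.1)).count x = 1 := by
        have := List.count_pos_iff.mpr (hall d (Or.inl rfl))
        omega
      have h2 : (vs.map (fun d => (d.map (·.1)).count x)).sum = vs.length :=
        (ih hvs).mpr (fun d' hm => hall d' (Or.inr hm))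
      omega

-- keys of B's counter stay Nodup through the nested fold.
theorem cnt_keys_nodup (vs : List (List (String × Int))) (c : PySem.Dict String Int)
    (h : c.keys.Nodup) :
    (vs.foldl (fun c d => (d.map (·.1)).foldl (fun c k => c.modify k 0 (· + 1)) c) c).keys.Nodup := by
  induction vs generalizing c with
  | nil => exact h
  | cons d vs ih =>
    exact ih _ (PySem.Dict.nodup_keys_foldl_modify_key (d.map (·.1)) id 0
      (fun _ _ => (· + 1)) c h)

-- Membership in B's common list is exactly "counted n times" (for n ≠ 0).
theorem mem_commonB (cnt : PySem.Dict String Int) (hnd : cnt.keys.Nodup) (n : Int) (hn : n ≠ 0)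
    (x : String) :
    x ∈ (cnt.items.filter (fun p => p.2 == n)).map (·.1) ↔ cnt.getD x 0 = n := by
  simp only [List.mem_map, List.mem_filter, beq_iff_eq]
  constructor
  · rintro ⟨⟨k, v⟩, ⟨hm, hv⟩, rfl⟩
    simp only at hv; subst hv
    exact PySem.Dict.getD_of_mem_items cnt hm hnd 0
  · intro hgd
    rcases hq : cnt.get? x with _ | v
    · rw [PySem.Dict.getD_of_get?_eq_none cnt 0 hq] at hgd
      exact absurd hgd.symm hn
    · have hv : v = n := by
        rw [PySem.Dict.getD_of_get?_eq_some cnt 0 hq] at hgd; exact hgd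
      exact ⟨(x, n), ⟨PySem.Dict.mem_items_of_get?_eq_some cnt (hv ▸ hq), rfl⟩, rfl⟩

-- ===== VERDICT (by name: the statement is the Claim_ definition above) =====
theorem common_keys_spec : Claim_equal_common_keys := by
  intro dicts _ hpre
  obtain ⟨hlen, _, hinner⟩ := hpre
  unfold Spec_common_keys common_keys common_keys_alt
  rcases hd : dicts.map (·.2) with _ | ⟨v0, rest⟩
  · exfalso
    have : dicts.length = 0 := by simpa using congrArg List.length hd
    omega
  simp only [hd]
  have hinner' : ∀ d ∈ v0 :: rest, (d.map (·.1)).Nodup := by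
    intro d hm
    rw [← hd, List.mem_map] at hm
    obtain ⟨q, hq, rfl⟩ := hm
    exact hinner q hq
  have hnz : ((v0 :: rest).length : Int) ≠ 0 := by
    simp only [List.length_cons]
    push_cast
    omega
  have hiff : ∀ x : String,
      (x ∈ rest.foldl (fun s d => PySem.Set.inter s (d.map (·.1)))
          (PySem.Set.ofList (v0.map (·.1)))) ↔
      (x ∈ (((v0 :: rest).foldl
          (fun c d => (d.map (·.1)).foldl (fun c k => c.modify k 0 (· + 1)) c)
          PySem.Dict.empty).items.filter
            (fun p => p.2 == ((v0 :: rest).length : Int))).map (·.1)) := by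
    intro x
    rw [mem_foldl_inter, PySem.Set.mem_ofList,
      mem_commonB _ (cnt_keys_nodup (v0 :: rest) PySem.Dict.empty (by simp)) _ hnz,
      cnt_getD]
    simp only [PySem.Dict.getD_empty, zero_add]
    rw [show (fun d : List (String × Int) => (((d.map (·.1)).count x : Nat) : Int)) =
        (fun m : Nat => (m : Int)) ∘ (fun d : List (String × Int) => (d.map (·.1)).count x) from rfl,
      ← List.map_map, ← Nat.cast_list_sum, Int.natCast_inj,
      sum_count_eq_iff (v0 :: rest) x hinner']
    simp
  apply List.map_congr_left
  intro p hp
  congr 1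
  apply List.filter_congr
  intro kv _
  rcases hiff kv.1 with ⟨f, g⟩
  by_cases hx : kv.1 ∈ rest.foldl (fun s d => PySem.Set.inter s (d.map (·.1)))
      (PySem.Set.ofList (v0.map (·.1)))
  · have := f hx
    simp_all
  · have hnx : kv.1 ∉ (((v0 :: rest).foldl
        (fun c d => (d.map (·.1)).foldl (fun c k => c.modify k 0 (· + 1)) c)
        PySem.Dict.empty).items.filter
          (fun p => p.2 == ((v0 :: rest).length : Int))).map (·.1) :=
      fun h => hx (g h)
    simp_all
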